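-- pv_equiv track=rewrite | github.com/danielstarodubtsev/Python-3-QR-code-creator | main.py | add_version_code
-- ===== SOURCE A (Python) =====
-- from copy import deepcopy
--
-- def add_version_code(qr, version):
--     '''
--     Starting from version 7 there are special places near bottom-left and upper-right corners for the version code
--     '''
--
--     qr = deepcopy(qr)
--     size = len(qr[0])
--
--     if version <= 6:
--         return qr
--
--     version_codes = {7: '000010 011110 100110',
--                      8: '010001 011100 111000',
--                      9: '110111 011000 000100',
--                      10: '101001 111110 000000',
--                      11: '001111 111010 111100',
--                      12: '001101 100100 011010',
--                      13: '101011 100000 100110',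
--                      14: '110101 000110 100010',
--                      15: '010011 000010 011110',
--                      16: '011100 010001 011100',
--                      17: '111010 010101 100000',
--                      18: '100100 110011 100100',
--                      19: '000010 110111 011000',
--                      20: '000000 101001 111110',
--                      21: '100110 101101 000010',
--                      22: '111000 001011 000110',
--                      23: '011110 001111 111010',
--                      24: '001101 001101 100100',
--                      25: '101011 001001 011000',
--                      26: '110101 101111 011100',
--                      27: '010011 101011 100000',
--                      28: '010001 110101 000110',
--                      29: '110111 110001 111010',
--                      30: '101001 010111 111110',
--                      31: '001111 010011 000010',
--                      32: '101000 011000 101101',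
--                      33: '001110 011100 010001',
--                      34: '010000 111010 010101',
--                      35: '110110 111110 101001',
--                      36: '110100 100000 001111',
--                      37: '010010 100100 110011',
--                      38: '001100 000010 110111',
--                      39: '101010 000110 001011',
--                      40: '111001 000100 010101'}
--
--     code = version_codes[version].split()
--
--     for x in range(6):
--         for y in range(size - 11, size - 8):
--             line_num = y - size + 11
--             qr[y][x] = int(code[line_num][x])
--             qr[x][y] = int(code[line_num][x])
--
--     return qr
-- ===== SOURCE B (Python) =====
-- from copy import deepcopy
--
-- def add_version_code(qr, version):
--     '''
--     Compute the 18-bit BCH version-information codeword instead of a hardcoded table,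
--     then place it with the standard symmetric loop.
--     '''
--
--     qr = deepcopy(qr)
--     size = len(qr[0])
--
--     if version <= 6:
--         return qr
--
--     if not 7 <= version <= 40:
--         raise KeyError(version)
--
--     rem = version << 12
--     for i in range(17, 11, -1):
--         if rem >> i & 1:
--             rem ^= 0x1F25 << (i - 12)
--     codeword = version << 12 | rem
--
--     for x in range(6):
--         for y in range(size - 11, size - 8):
--             bit = codeword >> (3 * x + (y - size + 11)) & 1
--             qr[y][x] = bit
--             qr[x][y] = bit
--
--     return qr
-- ===== Notes on version B (the rewrite author's own statement) =====
-- stated objective: alternative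
-- what changed: B replaces A's hardcoded 34-entry version-code string table (dict lookup + string split + per-character int()) by computing the 18-bit BCH(18,6) version-information codeword arithmetically (version << 12 reduced modulo the generator polynomial 0x1F25) and reading the placed bits directly off the codeword, keeping the same early return, the same KeyError behaviour outside 7..40 and the identical symmetric placement loop.
import Mathlib
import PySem

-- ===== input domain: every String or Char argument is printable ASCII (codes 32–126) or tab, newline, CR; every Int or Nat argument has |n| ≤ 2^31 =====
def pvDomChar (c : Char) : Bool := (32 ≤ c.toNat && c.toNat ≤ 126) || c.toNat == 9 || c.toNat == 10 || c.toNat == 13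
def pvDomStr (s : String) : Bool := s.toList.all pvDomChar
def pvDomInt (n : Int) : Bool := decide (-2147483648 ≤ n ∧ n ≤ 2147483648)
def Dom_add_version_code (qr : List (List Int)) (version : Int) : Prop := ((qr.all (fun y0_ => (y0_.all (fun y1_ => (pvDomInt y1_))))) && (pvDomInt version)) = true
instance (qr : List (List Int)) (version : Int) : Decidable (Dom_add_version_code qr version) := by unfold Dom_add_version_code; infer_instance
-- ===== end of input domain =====

-- B replaces A's hardcoded 34-entry version-code table by computing the 18-bit BCH
-- version-information codeword (polynomial remainder mod 0x1F25); the symmetric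
-- placement loop is the standard one and stays. Objective: alternative (table → computation).

-- ===== PORT A =====
def versionCodes : PySem.Dict Int String :=
  ⟨[((7:Int), "000010 011110 100110"), (8, "010001 011100 111000"), (9, "110111 011000 000100"),
   (10, "101001 111110 000000"), (11, "001111 111010 111100"), (12, "001101 100100 011010"),
   (13, "101011 100000 100110"), (14, "110101 000110 100010"), (15, "010011 000010 011110"),
   (16, "011100 010001 011100"), (17, "111010 010101 100000"), (18, "100100 110011 100100"),
   (19, "000010 110111 011000"), (20, "000000 101001 111110"), (21, "100110 101101 000010"),
   (22, "111000 001011 000110"), (23, "011110 001111 111010"), (24, "001101 001101 100100"),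
   (25, "101011 001001 011000"), (26, "110101 101111 011100"), (27, "010011 101011 100000"),
   (28, "010001 110101 000110"), (29, "110111 110001 111010"), (30, "101001 010111 111110"),
   (31, "001111 010011 000010"), (32, "101000 011000 101101"), (33, "001110 011100 010001"),
   (34, "010000 111010 010101"), (35, "110110 111110 101001"), (36, "110100 100000 001111"),
   (37, "010010 100100 110011"), (38, "001100 000010 110111"), (39, "101010 000110 001011"),
   (40, "111001 000100 010101")]⟩

def add_version_code (qr : List (List Int)) (version : Int) : List (List Int) :=
  -- size = len(qr[0]); qr = [] (IndexError) is excluded by Pre_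
  let size : Int := (PySem.List.pyGetD qr 0 []).length
  if version ≤ 6 then qr
  else
    -- version_codes[version].split(); a missing key (KeyError) is excluded by Pre_
    let code : List (List Char) :=
      PySem.Chars.split₀ ((PySem.Dict.get? versionCodes version).getD "").toList
    (PySem.List.pyRange 0 6 1).foldl (fun qr x =>
      (PySem.List.pyRange (size - 11) (size - 8) 1).foldl (fun qr y =>
        let line_num := y - size + 11
        -- int(code[line_num][x]); always in range for the 34 table entries
        let v := (PySem.Int.ofChars? [PySem.List.pyGetD (PySem.List.pyGetD code line_num []) x ' ']).getD 0
        -- qr[y][x] = v ; qr[x][y] = v  (out-of-range writes = IndexError, excluded by Pre_)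
        let qr1 := PySem.List.pySetD qr y (PySem.List.pySetD (PySem.List.pyGetD qr y []) x v)
        PySem.List.pySetD qr1 x (PySem.List.pySetD (PySem.List.pyGetD qr1 x []) y v)) qr) qr

-- ===== PORT B =====
def add_version_code_alt (qr : List (List Int)) (version : Int) : List (List Int) :=
  let size : Int := (PySem.List.pyGetD qr 0 []).length
  if version ≤ 6 then qr
  else if ¬ (7 ≤ version ∧ version ≤ 40) then qr  -- Python B raises KeyError here; excluded by Pre_
  else
    -- BCH(18,6): reduce version << 12 modulo the generator 0x1F25
    let rem := (PySem.List.pyRange 17 11 (-1)).foldl (fun rem i =>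
      if PySem.Int.band (rem >>> i.toNat) 1 ≠ 0 then PySem.Int.bxor rem (0x1F25 <<< (i - 12).toNat)
      else rem) (version <<< 12)
    let codeword := PySem.Int.bor (version <<< 12) rem
    (PySem.List.pyRange 0 6 1).foldl (fun qr x =>
      (PySem.List.pyRange (size - 11) (size - 8) 1).foldl (fun qr y =>
        let bit := PySem.Int.band (codeword >>> (3 * x + (y - size + 11)).toNat) 1
        let qr1 := PySem.List.pySetD qr y (PySem.List.pySetD (PySem.List.pyGetD qr y []) x bit)
        PySem.List.pySetD qr1 x (PySem.List.pySetD (PySem.List.pyGetD qr1 x []) y bit)) qr) qr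

-- ===== PRECONDITION & SPEC =====
-- Pre_ = exactly the inputs where A returns: qr nonempty (else len(qr[0]) is an IndexError);
-- for version ≥ 7, version ≤ 40 (else KeyError) and every index the placement loop writes to
-- is in Python range (negative wraparound included) of the grid as given (else IndexError).
def Pre_add_version_code (qr : List (List Int)) (version : Int) : Prop :=
  qr ≠ [] ∧ (7 ≤ version →
    version ≤ 40 ∧
    (∀ x ∈ PySem.List.pyRange 0 6 1,
      ∀ y ∈ PySem.List.pyRange (((PySem.List.pyGetD qr 0 []).length : Int) - 11)
                               (((PySem.List.pyGetD qr 0 []).length : Int) - 8) 1,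
        PySem.Raise.InRange qr.length y ∧ PySem.Raise.InRange (PySem.List.pyGetD qr y []).length x ∧
        PySem.Raise.InRange qr.length x ∧ PySem.Raise.InRange (PySem.List.pyGetD qr x []).length y))
instance (qr : List (List Int)) (version : Int) : Decidable (Pre_add_version_code qr version) := by
  unfold Pre_add_version_code; infer_instance

def pvWitness_add_version_code : List (List Int) × Int := ([[0]], 1)

def Spec_add_version_code (qr : List (List Int)) (version : Int) (out : List (List Int)) : Prop := out = add_version_code_alt qr version
instance (qr : List (List Int)) (version : Int) (out : List (List Int)) : Decidable (Spec_add_version_code qr version out) := by unfold Spec_add_version_code; infer_instance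

-- ===== CLAIM (what is proved, stated in full; the proofs are below) =====
def Claim_equal_add_version_code : Prop := ∀ (qr : List (List Int)) (version : Int), Dom_add_version_code qr version → Pre_add_version_code qr version → Spec_add_version_code qr version (add_version_code qr version)

-- ===== LEMMAS AND PROOFS =====

-- For every version 7..40, every x 0..5 and line 0..2, the digit of the table entry
-- equals the corresponding bit of the computed BCH codeword (finite check).
lemma table_bits_eq :
    ∀ version ∈ PySem.List.pyRange 7 41 1, ∀ x ∈ PySem.List.pyRange 0 6 1,
      ∀ line ∈ PySem.List.pyRange 0 3 1,
        (PySem.Int.ofChars? [PySem.List.pyGetD (PySem.List.pyGetD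
            (PySem.Chars.split₀ ((PySem.Dict.get? versionCodes version).getD "").toList) line []) x ' ']).getD 0
        = PySem.Int.band
            ((PySem.Int.bor (version <<< 12)
              ((PySem.List.pyRange 17 11 (-1)).foldl (fun rem i =>
                if PySem.Int.band (rem >>> i.toNat) 1 ≠ 0 then PySem.Int.bxor rem (0x1F25 <<< (i - 12).toNat)
                else rem) (version <<< 12))) >>> (3 * x + line).toNat) 1 := by
  decide

theorem add_version_code_spec : Claim_equal_add_version_code := by
  intro qr version _hdom hpre
  unfold Spec_add_version_code
  by_cases h6 : version ≤ 6
  · simp only [add_version_code, add_version_code_alt, if_pos h6]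
  · have h7 : 7 ≤ version := by omega
    obtain ⟨h40, -⟩ := hpre.2 h7
    simp only [add_version_code, add_version_code_alt, if_neg h6, if_neg (by omega : ¬ ¬ (7 ≤ version ∧ version ≤ 40))]
    apply PySem.List.foldl_congr_mem'
    intro x hx acc
    apply PySem.List.foldl_congr_mem'
    intro y hy acc'
    have hxm : 0 ≤ x ∧ x < 6 := (PySem.List.mem_pyRange_one).1 hx
    have hym := (PySem.List.mem_pyRange_one).1 hy
    have hv := table_bits_eq version
      ((PySem.List.mem_pyRange_one).2 ⟨h7, by omega⟩) x hx
      (y - ((PySem.List.pyGetD qr 0 []).length : Int) + 11)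
      ((PySem.List.mem_pyRange_one).2 ⟨by omega, by omega⟩)
    simp only [hv]
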